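-- pv_equiv track=rewrite | github.com/Zshumake/spasticity | NeuroInject/tools/apply_moderate_batches_1_4.py | replace_supply_probe
-- ===== SOURCE A (Python) =====
-- def replace_supply_probe(supplies):
--     """Swap 'linear probe' line with curvilinear note for deep muscles."""
--     out = []
--     swapped = False
--     for s in supplies:
--         if "linear probe" in s.lower() and not swapped:
--             out.append("Ultrasound machine with curvilinear probe (5-8 MHz, for deep muscles)")
--             swapped = True
--         else:
--             out.append(s)
--     return out
-- ===== SOURCE B (Python) =====
-- def replace_supply_probe(supplies):
--     """Swap 'linear probe' line with curvilinear note for deep muscles."""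
--     idx = next((i for i, s in enumerate(supplies) if "linear probe" in s.lower()), None)
--     out = list(supplies)
--     if idx is not None:
--         out[idx] = "Ultrasound machine with curvilinear probe (5-8 MHz, for deep muscles)"
--     return out
-- ===== Notes on version B (the rewrite author's own statement) =====
-- stated objective: simpler
-- what changed: Replaces A's flag-guarded per-element rebuild with a two-phase locate-then-patch: find the first matching index, copy the list, overwrite that one slot.
import Mathlib
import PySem

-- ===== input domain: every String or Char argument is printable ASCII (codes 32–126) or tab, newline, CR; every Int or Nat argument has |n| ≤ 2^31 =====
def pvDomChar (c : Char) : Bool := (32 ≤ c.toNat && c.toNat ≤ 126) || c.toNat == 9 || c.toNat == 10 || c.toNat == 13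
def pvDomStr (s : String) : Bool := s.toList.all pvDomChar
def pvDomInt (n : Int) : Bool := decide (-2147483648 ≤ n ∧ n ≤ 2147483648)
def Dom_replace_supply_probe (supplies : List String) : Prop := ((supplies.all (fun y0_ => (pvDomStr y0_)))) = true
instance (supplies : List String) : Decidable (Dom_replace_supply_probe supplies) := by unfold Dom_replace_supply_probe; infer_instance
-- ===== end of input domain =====

-- B replaces A's flag-guarded interleaved rebuild with locate-then-patch (find first index, copy, set one slot); same return value, no mutation in either.
-- ===== PORT A =====
-- port of A: single pass keeping (out, swapped) state, per-element branch
def replace_supply_probe (supplies : List String) : List String :=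
  (supplies.foldl (fun (st : List String × Bool) s =>
    if PySem.Str.isIn "linear probe" (PySem.Str.lower s) && !st.2 then
      (st.1 ++ ["Ultrasound machine with curvilinear probe (5-8 MHz, for deep muscles)"], true)
    else
      (st.1 ++ [s], st.2)) ([], false)).1

-- ===== PORT B =====
-- port of B: locate the first matching index, then patch that one slot of a copy
def replace_supply_probe_alt (supplies : List String) : List String :=
  match supplies.findIdx? (fun s => PySem.Str.isIn "linear probe" (PySem.Str.lower s)) with
  | none => supplies
  | some i => supplies.set i "Ultrasound machine with curvilinear probe (5-8 MHz, for deep muscles)"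

-- ===== PRECONDITION & SPEC =====
def Spec_replace_supply_probe (supplies : List String) (out : List String) : Prop := out = replace_supply_probe_alt supplies
instance (supplies : List String) (out : List String) : Decidable (Spec_replace_supply_probe supplies out) := by unfold Spec_replace_supply_probe; infer_instance

-- ===== CLAIM (what is proved, stated in full; the proofs are below) =====
def Claim_equal_replace_supply_probe : Prop := ∀ (supplies : List String), Dom_replace_supply_probe supplies → Spec_replace_supply_probe supplies (replace_supply_probe supplies)

-- ===== LEMMAS AND PROOFS =====

-- After a match, A's fold just copies the rest.
theorem foldA_true (l : List String) (acc : List String) :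
    (l.foldl (fun (st : List String × Bool) s =>
      if PySem.Str.isIn "linear probe" (PySem.Str.lower s) && !st.2 then
        (st.1 ++ ["Ultrasound machine with curvilinear probe (5-8 MHz, for deep muscles)"], true)
      else
        (st.1 ++ [s], st.2)) (acc, true)).1 = acc ++ l := by
  induction l generalizing acc with
  | nil => simp
  | cons a t ih =>
    simp only [List.foldl_cons, Bool.not_true, Bool.and_false]
    rw [if_neg (by simp), ih]
    simp

-- A's fold from the unswapped state equals acc ++ B's result.
theorem foldA_false (l : List String) (acc : List String) :
    (l.foldl (fun (st : List String × Bool) s =>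
      if PySem.Str.isIn "linear probe" (PySem.Str.lower s) && !st.2 then
        (st.1 ++ ["Ultrasound machine with curvilinear probe (5-8 MHz, for deep muscles)"], true)
      else
        (st.1 ++ [s], st.2)) (acc, false)).1 = acc ++ replace_supply_probe_alt l := by
  induction l generalizing acc with
  | nil => simp [replace_supply_probe_alt]
  | cons a t ih =>
    simp only [List.foldl_cons, Bool.not_false, Bool.and_true]
    by_cases h : PySem.Str.isIn "linear probe" (PySem.Str.lower a) = true
    · rw [if_pos h, foldA_true]
      simp at h
      simp [replace_supply_probe_alt, List.findIdx?_cons, h]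
    · rw [if_neg h, ih]
      simp only [replace_supply_probe_alt, List.findIdx?_cons, h]
      cases hf : List.findIdx? (fun s => PySem.Str.isIn "linear probe" (PySem.Str.lower s)) t <;>
        simp

-- ===== VERDICT (by name: the statement is the Claim_ definition above) =====
theorem replace_supply_probe_spec : Claim_equal_replace_supply_probe := by
  intro supplies _
  unfold Spec_replace_supply_probe replace_supply_probe
  simpa using foldA_false supplies []
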